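-- pv_equiv track=rewrite | github.com/ishangote/Coding-Interviews-Python | Leetcode/Reorder Data in Log Files/reorder_data.py | reorder_logs
-- ===== SOURCE A (Python) =====
-- def reorder_logs(logs):
--     #Split logs to digit logs and letter logs
--     digit, letter = [], []
--     for log in logs:
--         if log.split()[1].isdigit():
--             digit.append(log)
--         else:
--             letter.append(log)
--
--     #SORT BY SUFFIX, WHEN SUFFIX IS TIE SORT BY IDENTIFIER
--     letter.sort(key = lambda x: (x.split(' ')[1:], x.split(' ')[0]))
--
--     return letter + digit
-- ===== SOURCE B (Python) =====
-- def reorder_logs(logs):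
--     # One stable sort over the whole list: digit logs all share the largest key
--     # (so they keep their input order at the end), letter logs sort by (suffix words, identifier).
--     def key(log):
--         if log.split()[1].isdigit():
--             return (1, [], '')
--         parts = log.split(' ')
--         return (0, parts[1:], parts[0])
--     return sorted(logs, key=key)
-- ===== Notes on version B (the rewrite author's own statement) =====
-- stated objective: idiomatic
-- what changed: Replaces A's partition-into-two-lists / sort-the-letter-half / concatenate with a single stable sorted(logs, key=...) whose composite key makes all digit logs tie above every letter log, so sort stability keeps them in input order at the end.
import Mathlib
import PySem

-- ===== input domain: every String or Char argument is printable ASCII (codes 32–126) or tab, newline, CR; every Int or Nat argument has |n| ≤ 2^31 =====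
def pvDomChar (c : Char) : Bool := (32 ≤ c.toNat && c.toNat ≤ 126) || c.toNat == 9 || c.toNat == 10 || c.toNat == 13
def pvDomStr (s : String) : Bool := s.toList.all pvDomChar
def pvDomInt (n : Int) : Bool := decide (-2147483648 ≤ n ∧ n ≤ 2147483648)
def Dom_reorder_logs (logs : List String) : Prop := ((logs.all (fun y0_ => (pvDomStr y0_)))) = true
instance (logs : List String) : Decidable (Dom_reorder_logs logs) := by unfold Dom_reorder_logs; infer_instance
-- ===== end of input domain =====

-- B replaces A's partition / sort-the-letter-half / concatenate structure by ONE stable sort of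
-- the whole list with a composite key under which digit logs all tie above every letter log.


-- ===== PORT A =====
-- log.split()[1].isdigit() (shared by both Pythons verbatim; getD is never hit inside Pre_)
def isDigitLog (log : String) : Bool :=
  PySem.Str.strIsdigit ((PySem.List.pyGet? (PySem.Str.split₀ log) 1).getD "")

-- x.split(' ')  (sep " " ≠ "", so split? is always some; getD never hit)
def partsSp (x : String) : List String := (PySem.Str.split? x " ").getD []

def reorder_logs (logs : List String) : List String :=
  let p := logs.foldl
    (fun (acc : List String × List String) log =>
      (if isDigitLog log then acc.1 ++ [log] else acc.1,
       if isDigitLog log then acc.2 else acc.2 ++ [log]))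
    ([], [])
  let letter := PySem.List.sorted2 p.2
    (fun x => PySem.List.slice (partsSp x) (some 1))
    (fun x => (PySem.List.pyGet? (partsSp x) 0).getD "")
  letter ++ p.1

-- ===== PORT B =====
-- the tuple key (0/1, parts[1:], parts[0])
def logKey (log : String) : Nat × List String × String :=
  if isDigitLog log then (1, [], "")
  else
    let parts := partsSp log
    (0, PySem.List.slice parts (some 1), (PySem.List.pyGet? parts 0).getD "")

-- Python's lexicographic comparison of two 3-tuples, written out by hand (PySem's sorted2
-- covers only 2-component keys); exact, since Nat, List String and String are linear orders.
def tupleLt (p q : Nat × List String × String) : Bool :=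
  decide (p.1 < q.1) ||
    (decide (p.1 = q.1) &&
      (decide (p.2.1 < q.2.1) || (decide (p.2.1 = q.2.1) && decide (p.2.2 < q.2.2))))

-- sorted(logs, key=logKey): PySem.List.sorted IS this foldl (PySem.List.sorted_eq_foldl_insertBy)
def reorder_logs_alt (logs : List String) : List String :=
  logs.foldl (fun acc x => PySem.List.insertBy (fun a b => tupleLt (logKey a) (logKey b)) x acc) []

-- ===== PRECONDITION & SPEC =====
-- Pre_ excludes exactly the logs on which `log.split()[1]` raises IndexError in both Pythons.
def Pre_reorder_logs (logs : List String) : Prop :=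
  ∀ log ∈ logs, 2 ≤ (PySem.Str.split₀ log).length
instance (logs : List String) : Decidable (Pre_reorder_logs logs) := by
  unfold Pre_reorder_logs; infer_instance

def pvWitness_reorder_logs : List String :=
  ["dig1 8 1 5 1", "let1 art can", "let3 art zero", "dig2 3 6", "let2 own kit dig"]

def Spec_reorder_logs (logs : List String) (out : List String) : Prop := out = reorder_logs_alt logs
instance (logs : List String) (out : List String) : Decidable (Spec_reorder_logs logs out) := by unfold Spec_reorder_logs; infer_instance

-- ===== CLAIM (what is proved, stated in full; the proofs are below) =====
def Claim_equal_reorder_logs : Prop := ∀ (logs : List String), Dom_reorder_logs logs → Pre_reorder_logs logs → Spec_reorder_logs logs (reorder_logs logs)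

-- ===== LEMMAS AND PROOFS =====

-- A's letter-sort comparison (sorted2's lt for the key pair (suffix, identifier))
def beforeA (a b : String) : Bool :=
  decide (PySem.List.slice (partsSp a) (some 1) < PySem.List.slice (partsSp b) (some 1)) ||
  (!decide (PySem.List.slice (partsSp b) (some 1) < PySem.List.slice (partsSp a) (some 1)) &&
   decide ((PySem.List.pyGet? (partsSp a) 0).getD "" < (PySem.List.pyGet? (partsSp b) 0).getD ""))

def beforeB (a b : String) : Bool := tupleLt (logKey a) (logKey b)

lemma beforeB_letter_digit (a b : String) (ha : isDigitLog a = false) (hb : isDigitLog b = true) :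
    beforeB a b = true := by
  simp [beforeB, tupleLt, logKey, ha, hb]

lemma beforeB_digit (a b : String) (ha : isDigitLog a = true) :
    beforeB a b = false := by
  by_cases hb : isDigitLog b = true
  · simp [beforeB, tupleLt, logKey, ha, hb]
  · simp only [Bool.not_eq_true] at hb
    simp [beforeB, tupleLt, logKey, ha, hb]

lemma beforeB_letter_letter (a b : String) (ha : isDigitLog a = false) (hb : isDigitLog b = false) :
    beforeB a b = beforeA a b := by
  simp only [beforeB, tupleLt, logKey, ha, hb, Bool.false_eq_true, if_false, beforeA,
    lt_self_iff_false, decide_false, Bool.false_or, decide_true, Bool.true_and]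
  by_cases h1 : PySem.List.slice (partsSp a) (some 1) < PySem.List.slice (partsSp b) (some 1)
  · simp [h1, not_lt_of_gt h1]
  · by_cases h2 : PySem.List.slice (partsSp b) (some 1) < PySem.List.slice (partsSp a) (some 1)
    · have hne : PySem.List.slice (partsSp a) (some 1) ≠ PySem.List.slice (partsSp b) (some 1) :=
        fun h => absurd (h ▸ h2) (lt_irrefl _)
      simp [h1, h2, hne]
    · have heq : PySem.List.slice (partsSp a) (some 1) = PySem.List.slice (partsSp b) (some 1) :=
        le_antisymm (not_lt.mp h2) (not_lt.mp h1)
      simp [h1, h2, heq]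

-- inserting a letter log into (letters ++ digits) with beforeB = inserting into letters with beforeA
lemma insertB_letter (x : String) (hx : isDigitLog x = false) :
    ∀ (L D : List String), (∀ y ∈ L, isDigitLog y = false) → (∀ d ∈ D, isDigitLog d = true) →
    PySem.List.insertBy beforeB x (L ++ D) = PySem.List.insertBy beforeA x L ++ D := by
  intro L
  induction L with
  | nil =>
    intro D _ hD
    cases D with
    | nil => rfl
    | cons d ds =>
      simp [PySem.List.insertBy, beforeB_letter_digit x d hx (hD d (by simp))]
  | cons y L ih =>
    intro D hL hD
    have hy : isDigitLog y = false := hL y (by simp)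
    have hby : beforeB x y = beforeA x y := beforeB_letter_letter x y hx hy
    simp only [List.cons_append, PySem.List.insertBy, hby]
    by_cases hb : beforeA x y = true
    · simp [hb]
    · simp only [Bool.not_eq_true] at hb
      rw [hb]
      simp only [Bool.false_eq_true, if_false, List.cons_append, List.cons.injEq, true_and]
      exact ih D (fun z hz => hL z (by simp [hz])) hD

-- inserting a digit log with beforeB appends it at the very end
lemma insertB_digit (x : String) (hx : isDigitLog x = true) (M : List String) :
    PySem.List.insertBy beforeB x M = M ++ [x] :=
  PySem.List.insertBy_of_forall_not_before beforeB x M (fun y _ => beforeB_digit x y hx)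

-- the single stable sort, run over any suffix l from a state (letters ++ digits)
lemma main_fold (l : List String) : ∀ (L D : List String),
    (∀ y ∈ L, isDigitLog y = false) → (∀ d ∈ D, isDigitLog d = true) →
    l.foldl (fun acc x => PySem.List.insertBy beforeB x acc) (L ++ D) =
      (l.filter (fun x => !isDigitLog x)).foldl
        (fun acc x => PySem.List.insertBy beforeA x acc) L
      ++ (D ++ l.filter (fun x => isDigitLog x)) := by
  induction l with
  | nil => intro L D _ _; simp
  | cons x l ih =>
    intro L D hL hD
    by_cases hx : isDigitLog x = true
    · simp only [List.foldl_cons, insertB_digit x hx (L ++ D), List.append_assoc]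
      have := ih L (D ++ [x]) hL (by
        intro d hd
        rcases List.mem_append.mp hd with h | h
        · exact hD d h
        · simp only [List.mem_singleton] at h; exact h ▸ hx)
      simp only [← List.append_assoc] at this ⊢
      rw [this]
      simp [hx]
    · simp only [Bool.not_eq_true] at hx
      simp only [List.foldl_cons, insertB_letter x hx L D hL hD]
      have := ih (PySem.List.insertBy beforeA x L) D
        (by
          intro y hy
          rcases (PySem.List.mem_insertBy beforeA x y L).mp hy with h | h
          · exact h ▸ hx
          · exact hL y h)
        hD
      rw [this]
      simp [hx]

-- ===== VERDICT (by name: the statement is the Claim_ definition above) =====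
theorem reorder_logs_spec : Claim_equal_reorder_logs := by
  intro logs _ _
  unfold Spec_reorder_logs reorder_logs reorder_logs_alt
  rw [PySem.List.foldl_prod_mk
        (f := fun acc log => if isDigitLog log then acc ++ [log] else acc)
        (g := fun acc log => if isDigitLog log then acc else acc ++ [log])]
  simp only [PySem.List.foldl_append_if_eq_filter]
  have hdig : logs.foldl (fun acc log => if isDigitLog log then acc else acc ++ [log]) [] =
      logs.filter (fun x => !isDigitLog x) := by
    have h2 : logs.foldl (fun acc log => if isDigitLog log then acc else acc ++ [log]) [] =
        logs.foldl (fun acc x => if (!isDigitLog x) = true then acc ++ [x] else acc) [] := by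
      apply PySem.List.foldl_congr_mem
      intro acc x _
      by_cases hx : isDigitLog x = true <;> simp [hx]
    rw [h2, PySem.List.foldl_append_if_eq_filter]
    simp
  rw [hdig]
  have hmain := main_fold logs [] [] (by simp) (by simp)
  simp only [List.append_nil, List.nil_append] at hmain
  exact hmain.symm
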